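-- pv_equiv track=rewrite | github.com/shrisawant144/astro | chart4.py | _houses_are_consecutive
-- ===== SOURCE A (Python) =====
-- def _houses_are_consecutive(house_set):
--     """Return True if the given set of house numbers (1-12) form a
--     gapless consecutive sequence, accounting for zodiac wrap-around.
--     E.g. {10,11,12,1} is consecutive; {2,3,5} is not.
--     """
--     houses = sorted(house_set)
--     n = len(houses)
--     if n < 2:
--         return True
--     for start_i in range(n):
--         ok = True
--         for j in range(1, n):
--             diff = (houses[(start_i + j) % n] - houses[(start_i + j - 1) % n]) % 12
--             if diff != 1:
--                 ok = False
--                 break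
--         if ok:
--             return True
--     return False
-- ===== SOURCE B (Python) =====
-- def _houses_are_consecutive(house_set):
--     """Return True if the given set of house numbers (1-12) form a
--     gapless consecutive sequence, accounting for zodiac wrap-around."""
--     houses = sorted(house_set)
--     n = len(houses)
--     if n < 2:
--         return True
--     gaps = [(b - a) % 12 for a, b in zip(houses, houses[1:])]
--     gaps.append((houses[0] - houses[-1]) % 12)
--     return sum(1 for g in gaps if g != 1) <= 1
-- ===== Notes on version B (the rewrite author's own statement) =====
-- stated objective: alternative
-- what changed: A tries every rotation of the sorted list as a starting point and re-checks all n-1 cyclic differences for each (worst-case quadratic after sorting); B computes the n cyclic adjacency gaps of the sorted list once and returns True iff at most one gap differs from 1 (a single linear pass), which is asymptotically better in the worst case but was not consistently >=1.5x on the generated inputs.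
import Mathlib
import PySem

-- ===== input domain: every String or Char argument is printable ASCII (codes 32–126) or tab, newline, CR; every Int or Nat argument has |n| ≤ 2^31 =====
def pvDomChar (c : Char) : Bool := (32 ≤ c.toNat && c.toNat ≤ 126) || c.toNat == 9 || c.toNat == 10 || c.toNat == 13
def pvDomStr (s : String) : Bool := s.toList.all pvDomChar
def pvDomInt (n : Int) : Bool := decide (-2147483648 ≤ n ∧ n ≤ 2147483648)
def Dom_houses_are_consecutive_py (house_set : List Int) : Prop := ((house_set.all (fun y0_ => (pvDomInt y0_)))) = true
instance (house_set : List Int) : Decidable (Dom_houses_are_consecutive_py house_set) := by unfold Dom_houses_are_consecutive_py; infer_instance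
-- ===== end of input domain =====

-- B counts the cyclic adjacency gaps ≠ 1 of the sorted list in one pass and accepts iff at
-- most one gap is not 1, instead of A's re-checking all gaps for every rotation start.

-- ===== PORT A =====
-- literal port of A: sort, then for each start rotation check all n-1 cyclic diffs;
-- the inner 'break' / outer 'return True' are the short-circuit `all` / `any`.
-- every index is (… % n) with n > 0, hence in range, so pyGetD's default is never used.
def houses_are_consecutive_py (house_set : List Int) : Bool :=
  let houses := PySem.List.sorted house_set (fun x => x) false
  let n : Int := houses.length
  if n < 2 then true
  else
    (PySem.List.pyRange 0 n 1).any (fun start_i =>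
      (PySem.List.pyRange 1 n 1).all (fun j =>
        PySem.Int.mod
          (PySem.List.pyGetD houses (PySem.Int.mod (start_i + j) n) 0
            - PySem.List.pyGetD houses (PySem.Int.mod (start_i + j - 1) n) 0) 12 == 1))

-- ===== PORT B =====
-- literal port of Source B: gaps from zip(houses, houses[1:]) plus the wrap gap, then count ≠ 1.
def houses_are_consecutive_py_alt (house_set : List Int) : Bool :=
  let houses := PySem.List.sorted house_set (fun x => x) false
  let n := houses.length
  if n < 2 then true
  else
    let gaps :=
      ((houses.zip (PySem.List.slice houses (some 1) none)).map
        (fun ab => PySem.Int.mod (ab.2 - ab.1) 12))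
      ++ [PySem.Int.mod (PySem.List.pyGetD houses 0 0 - PySem.List.pyGetD houses (-1) 0) 12]
    decide (gaps.countP (fun g => g != 1) ≤ 1)

-- ===== PRECONDITION & SPEC =====
def Spec_houses_are_consecutive_py (house_set : List Int) (out : Bool) : Prop := out = houses_are_consecutive_py_alt house_set
instance (house_set : List Int) (out : Bool) : Decidable (Spec_houses_are_consecutive_py house_set out) := by unfold Spec_houses_are_consecutive_py; infer_instance

-- ===== CLAIM (what is proved, stated in full; the proofs are below) =====
def Claim_equal_houses_are_consecutive_py : Prop := ∀ (house_set : List Int), Dom_houses_are_consecutive_py house_set → Spec_houses_are_consecutive_py house_set (houses_are_consecutive_py house_set)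

-- ===== LEMMAS AND PROOFS =====

-- the i-th cyclic gap of l (indices taken mod l.length)
def pvG (l : List Int) (i : Nat) : Int :=
  PySem.Int.mod (l.getD ((i + 1) % l.length) 0 - l.getD (i % l.length) 0) 12

lemma pvG_mod (l : List Int) (i : Nat) : pvG l (i % l.length) = pvG l i := by
  unfold pvG
  rw [Nat.mod_mod_of_dvd i (dvd_refl l.length), Nat.add_mod (i % l.length) 1,
    Nat.mod_mod_of_dvd i (dvd_refl l.length), ← Nat.add_mod i 1]

lemma pv_two_le_length {α : Type} {l : List α} {a c : α} (ha : a ∈ l) (hc : c ∈ l)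
    (h : a ≠ c) : 2 ≤ l.length := by
  match l with
  | [] => cases ha
  | [x] =>
    rw [List.mem_singleton] at ha hc
    exact absurd (ha.trans hc.symm) h
  | x :: y :: t => simp only [List.length_cons]; omega

lemma pv_two_le_countP {p : Nat → Bool} {n a c : Nat} (ha : a < n) (hc : c < n)
    (hne : a ≠ c) (hpa : p a = true) (hpc : p c = true) : 2 ≤ (List.range n).countP p := by
  rw [List.countP_eq_length_filter]
  exact pv_two_le_length (List.mem_filter.mpr ⟨List.mem_range.mpr ha, hpa⟩)
    (List.mem_filter.mpr ⟨List.mem_range.mpr hc, hpc⟩) hne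

lemma pv_mod_shift_cancel (n s a : Nat) (hs : s < n) (ha : a < n) :
    (s + ((a + n - s) % n)) % n = a := by
  rcases Nat.lt_or_ge a s with h' | h
  · have h1 : (a + n - s) % n = a + n - s := Nat.mod_eq_of_lt (by omega)
    rw [h1]
    have : s + (a + n - s) = a + n := by omega
    rw [this, Nat.add_mod_right]; exact Nat.mod_eq_of_lt ha
  · have h1 : (a + n - s) % n = a - s := by
      have : a + n - s = (a - s) + n := by omega
      rw [this, Nat.add_mod_right]
      exact Nat.mod_eq_of_lt (by omega)
    rw [h1]; rw [Nat.mod_eq_of_lt (by omega)]; omega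

-- the combinatorial heart: some rotation sees only gaps 1 ↔ at most one gap is not 1
lemma pv_key (n : Nat) (hn : 2 ≤ n) (G : Nat → Int) (hG : ∀ i, G (i % n) = G i) :
    ((List.range n).any fun s => (List.range (n - 1)).all fun k => G (s + k) == 1)
      = decide ((List.range n).countP (fun i => G i != 1) ≤ 1) := by
  rw [Bool.eq_iff_iff]
  simp only [List.any_eq_true, List.all_eq_true, List.mem_range, beq_iff_eq,
    decide_eq_true_eq]
  constructor
  · rintro ⟨s, hs, hall⟩
    have key1 : ∀ i < n, i ≠ (s + (n - 1)) % n → G i = 1 := by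
      intro i hi hib
      have hk : (i + n - s) % n < n := Nat.mod_lt _ (by omega)
      have h1 : (s + ((i + n - s) % n)) % n = i := pv_mod_shift_cancel n s i hs hi
      have hk1 : (i + n - s) % n ≠ n - 1 := by
        intro h; exact hib (by rw [← h1, h])
      have h2 := hall ((i + n - s) % n) (by omega)
      rw [← hG (s + (i + n - s) % n), h1] at h2
      exact h2
    calc (List.range n).countP (fun i => G i != 1)
        ≤ (List.range n).countP (fun i => i == (s + (n - 1)) % n) := by
          apply List.countP_mono_left
          intro i hi hp
          simp only [bne_iff_ne, ne_eq] at hp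
          simp only [beq_iff_eq]
          by_contra hne
          exact hp (key1 i (List.mem_range.mp hi) hne)
      _ = (List.range n).count ((s + (n - 1)) % n) := rfl
      _ ≤ 1 := List.nodup_iff_count_le_one.mp (List.nodup_range) _
  · intro hcount
    by_cases hex : ∃ b, b < n ∧ G b ≠ 1
    · obtain ⟨b, hb, hGb⟩ := hex
      have huniq : ∀ i < n, G i ≠ 1 → i = b := by
        intro i hi hGi
        by_contra hne
        have := pv_two_le_countP (p := fun i => G i != 1) hi hb hne
          (by simp [hGi]) (by simp [hGb])
        omega
      refine ⟨(b + 1) % n, Nat.mod_lt _ (by omega), fun k hk => ?_⟩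
      rw [← hG ((b + 1) % n + k)]
      have hlt : ((b + 1) % n + k) % n < n := Nat.mod_lt _ (by omega)
      by_contra hne1
      have heqb : ((b + 1) % n + k) % n = b := huniq _ hlt hne1
      have h3 : ((b + 1) % n + k) % n = (b + 1 + k) % n := by
        conv_rhs => rw [Nat.add_mod (b + 1) k, Nat.mod_eq_of_lt (show k < n by omega)]
      rw [h3] at heqb
      rcases lt_or_ge (b + 1 + k) n with h | h
      · rw [Nat.mod_eq_of_lt h] at heqb; omega
      · have h4 : b + 1 + k - n < n := by omega
        rw [Nat.mod_eq_sub_mod h, Nat.mod_eq_of_lt h4] at heqb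
        omega
    · refine ⟨0, by omega, fun k hk => ?_⟩
      rw [Nat.zero_add, ← hG k]
      by_contra hne
      exact hex ⟨k % n, Nat.mod_lt _ (by omega), hne⟩

-- B's gap list is the list of cyclic gaps in order
lemma pv_gaps_eq (l : List Int) (h2 : 2 ≤ l.length) :
    ((l.zip (PySem.List.slice l (some 1) none)).map
        (fun ab => PySem.Int.mod (ab.2 - ab.1) 12))
      ++ [PySem.Int.mod (PySem.List.pyGetD l 0 0 - PySem.List.pyGetD l (-1) 0) 12]
    = (List.range l.length).map (pvG l) := by
  have hlen : l.length - 1 + 1 = l.length := by omega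
  rw [PySem.List.slice_from_one, ← hlen, List.range_succ, List.map_append]
  congr 1
  · apply List.ext_getElem
    · simp only [List.length_map, List.length_zip, List.length_tail, List.length_range]
      omega
    · intro i h1 h2'
      have hi : i < l.length - 1 := by
        simp only [List.length_map, List.length_zip, List.length_tail] at h1; omega
      simp only [List.getElem_map, List.getElem_zip, List.getElem_tail, List.getElem_range]
      unfold pvG
      rw [Nat.mod_eq_of_lt (by omega), Nat.mod_eq_of_lt (by omega),
        List.getD_eq_getElem l 0 (by omega), List.getD_eq_getElem l 0 (by omega)]
  · simp only [List.map_cons, List.map_nil]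
    unfold pvG
    rw [hlen, Nat.mod_self, Nat.mod_eq_of_lt (by omega),
      PySem.List.pyGetD_zero,
      PySem.List.pyGetD_neg_ofNat l 1 0 (by omega) (by omega),
      List.getD_eq_getElem l 0 (by omega), List.getD_eq_getElem l 0 (by omega)]

-- A's rotation scan written over Nat ranges and pvG
lemma pv_anyA_eq (l : List Int) :
    ((PySem.List.pyRange 0 (l.length : Int) 1).any (fun start_i =>
      (PySem.List.pyRange 1 (l.length : Int) 1).all (fun j =>
        PySem.Int.mod
          (PySem.List.pyGetD l (PySem.Int.mod (start_i + j) (l.length : Int)) 0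
            - PySem.List.pyGetD l (PySem.Int.mod (start_i + j - 1) (l.length : Int)) 0) 12 == 1)))
    = ((List.range l.length).any fun s => (List.range (l.length - 1)).all fun k =>
        pvG l (s + k) == 1) := by
  rw [PySem.List.pyRange_zero_natCast, PySem.List.pyRange_one 1 (l.length : Int),
    List.any_map]
  have htn : ((l.length : Int) - 1).toNat = l.length - 1 := by omega
  rw [htn]
  congr 1
  funext s
  simp only [Function.comp_apply, List.all_map]
  congr 1
  funext k
  simp only [Function.comp_apply]
  have e1 : (s : Int) + (1 + (k : Int)) = ((s + k + 1 : Nat) : Int) := by push_cast; ring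
  have e2 : (s : Int) + (1 + (k : Int)) - 1 = ((s + k : Nat) : Int) := by push_cast; ring
  rw [e2, e1, PySem.Int.mod_natCast, PySem.Int.mod_natCast,
    PySem.List.pyGetD_natCast, PySem.List.pyGetD_natCast]
  rfl

-- ===== VERDICT (by name: the statement is the Claim_ definition above) =====
theorem houses_are_consecutive_py_spec : Claim_equal_houses_are_consecutive_py := by
  intro house_set _
  unfold Spec_houses_are_consecutive_py houses_are_consecutive_py houses_are_consecutive_py_alt
  set l := PySem.List.sorted house_set (fun x => x) false with hl
  by_cases h : l.length < 2
  · simp only [h, if_pos]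
    rw [if_pos (by exact_mod_cast h)]
  · rw [not_lt] at h
    rw [if_neg (by exact_mod_cast not_lt.mpr (by exact_mod_cast h)), if_neg (by omega)]
    rw [pv_anyA_eq l, pv_key l.length h (pvG l) (pvG_mod l), pv_gaps_eq l h]
    congr 1
    rw [List.countP_map]
    rfl
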